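-- pv_equiv track=rewrite | github.com/cdunn314/libra-toolbox | libra_toolbox/neutron_detection/activation_foils/compass.py | group_close_values
-- ===== SOURCE A (Python) =====
-- def group_close_values(data, threshold=200):
--     # Sort the data to group values sequentially
--     data.sort()
--
--     # Initialize groups and a temporary group
--     groups = []
--     temp_group = [data[0]]
--
--     for i in range(1, len(data)):
--         # Check if the current value is within the threshold of the last value in the temp group
--         if abs(data[i] - temp_group[-1]) < threshold:
--             temp_group.append(data[i])
--         else:
--             # Commit the temp group to groups and start a new group
--             groups.append(tuple(temp_group))
--             temp_group = [data[i]]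
--
--     # Add the last group
--     groups.append(tuple(temp_group))
--
--     return groups
-- ===== SOURCE B (Python) =====
-- def group_close_values(data, threshold=200):
--     # Two-stage: first find boundary indices, then materialize groups by slicing.
--     # Sorts `data` in place like the original.
--     data.sort()
--     if not data:
--         return []
--     cuts = [0]
--     for i in range(1, len(data)):
--         if not (abs(data[i] - data[i - 1]) < threshold):
--             cuts.append(i)
--     cuts.append(len(data))
--     return [tuple(data[cuts[j]:cuts[j + 1]]) for j in range(len(cuts) - 1)]
-- ===== Notes on version B (the rewrite author's own statement) =====
-- stated objective: alternative
-- what changed: B is a staged computation: one pass records boundary indices where a new group starts (cut points), then the groups are materialized by slicing data between consecutive cut points, instead of A's single pass accumulating a temp_group and flushing it at each break.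
import Mathlib
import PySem

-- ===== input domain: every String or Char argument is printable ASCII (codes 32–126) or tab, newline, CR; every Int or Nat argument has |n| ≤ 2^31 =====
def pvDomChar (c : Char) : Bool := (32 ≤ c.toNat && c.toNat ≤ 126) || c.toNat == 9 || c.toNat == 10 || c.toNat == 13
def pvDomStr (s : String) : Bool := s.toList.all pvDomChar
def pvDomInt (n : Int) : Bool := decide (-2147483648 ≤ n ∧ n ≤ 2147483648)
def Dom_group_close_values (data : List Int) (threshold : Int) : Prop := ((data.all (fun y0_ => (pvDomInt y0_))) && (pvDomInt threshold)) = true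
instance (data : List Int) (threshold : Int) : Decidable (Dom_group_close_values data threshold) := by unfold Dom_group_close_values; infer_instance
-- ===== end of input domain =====

-- B computes the result in two stages (collect the boundary indices of the groups, then slice
-- the sorted data between consecutive boundaries) instead of A's single accumulating pass
-- (objective: alternative). Both Pythons sort `data` in place; the equivalence proved here is
-- about the return value.

-- ===== PORT A =====
-- A: sort, then forward fold carrying (groups, temp_group); temp compared via its last element.
def group_close_values (data : List Int) (threshold : Int) : List (List Int) :=
  let d := PySem.List.sorted data (fun x => x) false
  match d with
  | [] => []   -- Python raises IndexError on data[0] here; excluded by Pre_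
  | x :: rest =>
    let st := rest.foldl (fun (st : List (List Int) × List Int) y =>
      if |y - st.2.getLast!| < threshold then (st.1, st.2 ++ [y])
      else (st.1 ++ [st.2], [y])) ([], [x])
    st.1 ++ [st.2]

-- ===== PORT B =====
-- B: sort, collect cut indices [0] ++ breaks ++ [len], then map a slice over consecutive cuts.
def group_close_values_alt (data : List Int) (threshold : Int) : List (List Int) :=
  let d := PySem.List.sorted data (fun x => x) false
  if d = [] then []
  else
    let cuts := (PySem.List.pyRange 1 (d.length : Int) 1).foldl
      (fun cuts i =>
        if ¬ (|PySem.List.pyGetD d i 0 - PySem.List.pyGetD d (i - 1) 0| < threshold)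
        then cuts ++ [i] else cuts) [(0 : Int)]
    let cuts := cuts ++ [(d.length : Int)]
    (PySem.List.pyRange 0 ((cuts.length : Int) - 1) 1).map
      (fun j => PySem.List.slice d (some (PySem.List.pyGetD cuts j 0))
                                   (some (PySem.List.pyGetD cuts (j + 1) 0)))

-- ===== PRECONDITION & SPEC =====
-- Pre_ excludes only the empty list, on which Python A raises IndexError (data[0]).
def Pre_group_close_values (data : List Int) (threshold : Int) : Prop := data ≠ []
instance (data : List Int) (threshold : Int) : Decidable (Pre_group_close_values data threshold) := by unfold Pre_group_close_values; infer_instance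
def pvWitness_group_close_values : List Int × Int := ([5, 300, 7], 200)

def Spec_group_close_values (data : List Int) (threshold : Int) (out : List (List Int)) : Prop := out = group_close_values_alt data threshold
instance (data : List Int) (threshold : Int) (out : List (List Int)) : Decidable (Spec_group_close_values data threshold out) := by unfold Spec_group_close_values; infer_instance

-- ===== CLAIM (what is proved, stated in full; the proofs are below) =====
def Claim_equal_group_close_values : Prop := ∀ (data : List Int) (threshold : Int), Dom_group_close_values data threshold → Pre_group_close_values data threshold → Spec_group_close_values data threshold (group_close_values data threshold)

-- ===== LEMMAS AND PROOFS =====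

-- reference form of the grouping: structural recursion prepending into the first group
def pvRecB (threshold : Int) : List Int → List (List Int)
  | [] => []
  | [x] => [[x]]
  | x :: y :: rest =>
    match pvRecB threshold (y :: rest) with
    | g :: gs => if |y - x| < threshold then (x :: g) :: gs else [x] :: g :: gs
    | [] => []   -- unreachable

lemma pvRecB_ne_nil (t : Int) (x : Int) (xs : List Int) : pvRecB t (x :: xs) ≠ [] := by
  cases xs with
  | nil => simp [pvRecB]
  | cons y ys =>
    simp only [pvRecB]
    cases h : pvRecB t (y :: ys) with
    | nil => exact absurd h (pvRecB_ne_nil t y ys)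
    | cons g gs => split_ifs <;> simp

lemma pv_getLast_concat (q : List Int) (x : Int) : (q ++ [x]).getLast! = x := by
  cases h : q ++ [x] with
  | nil => simp at h
  | cons a as =>
    simp only [List.getLast!]
    have : (a :: as).getLast (by simp) = (q ++ [x]).getLast (by simp) := by congr 1; exact h.symm
    rw [this, List.getLast_append]
    simp

-- A-side loop invariant: starting the fold with temp = q ++ [x], the flushed result is the
-- accumulated groups followed by the reference grouping of x :: rest with q glued onto its first group.
lemma pv_loop (t : Int) : ∀ (rest : List Int) (groups : List (List Int)) (q : List Int) (x : Int),
    (let st := rest.foldl (fun (st : List (List Int) × List Int) y =>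
        if |y - st.2.getLast!| < t then (st.1, st.2 ++ [y])
        else (st.1 ++ [st.2], [y])) (groups, q ++ [x]);
      st.1 ++ [st.2])
    = groups ++ (match pvRecB t (x :: rest) with
        | g :: gs => (q ++ g) :: gs
        | [] => []) := by
  intro rest
  induction rest with
  | nil => intro groups q x; simp [pvRecB]
  | cons y ys ih =>
    intro groups q x
    have hlast : (q ++ [x]).getLast! = x := pv_getLast_concat q x
    simp only [List.foldl_cons, hlast]
    by_cases h : |y - x| < t
    · simp only [h, if_pos]
      have := ih groups (q ++ [x]) y
      simp only [List.append_assoc] at this ⊢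
      rw [this]
      cases hb : pvRecB t (y :: ys) with
      | nil => exact absurd hb (pvRecB_ne_nil t y ys)
      | cons g gs => simp [pvRecB, hb, h]
    · simp only [h, if_neg, not_false_iff]
      have := ih (groups ++ [q ++ [x]]) [] y
      simp only [List.nil_append] at this
      rw [this]
      cases hb : pvRecB t (y :: ys) with
      | nil => exact absurd hb (pvRecB_ne_nil t y ys)
      | cons g gs => simp [pvRecB, hb, h]

-- B-side: the interior cut indices, as the filter the cuts-fold produces
def pvI (t : Int) (d : List Int) : List Int :=
  (PySem.List.pyRange 1 (d.length : Int) 1).filter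
    (fun i => decide (¬ (|PySem.List.pyGetD d i 0 - PySem.List.pyGetD d (i - 1) 0| < t)))

lemma pvI_nonneg (t : Int) (d : List Int) : ∀ i ∈ pvI t d, 0 ≤ i := by
  intro i hi
  have hm := List.mem_of_mem_filter hi
  have := (PySem.List.mem_pyRange_one).mp hm
  omega

lemma pv_map_adjacent_nat (f : Int → Int → List Int) : ∀ (c : List Int),
    (List.range (c.length - 1)).map (fun k => f (c.getD k 0) (c.getD (k + 1) 0))
      = List.zipWith f c c.tail := by
  intro c
  induction c with
  | nil => simp
  | cons a c' ih =>
    cases c' with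
    | nil => simp
    | cons b r =>
      simp only [List.length_cons, Nat.add_sub_cancel] at ih ⊢
      rw [List.range_succ_eq_map, List.map_cons, List.map_map]
      simp only [Function.comp_def, Nat.succ_eq_add_one, List.getD_cons_succ,
        List.getD_cons_zero, List.zipWith_cons_cons, List.tail_cons] at ih ⊢
      rw [ih]

lemma pv_zip_shift (d' : List Int) (a : Int) : ∀ (l1 l2 : List Int),
    (∀ i ∈ l1, 0 ≤ i) → (∀ i ∈ l2, 0 ≤ i) →
    List.zipWith (fun i j => PySem.List.slice (a :: d') (some i) (some j))
        (l1.map (· + 1)) (l2.map (· + 1))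
      = List.zipWith (fun i j => PySem.List.slice d' (some i) (some j)) l1 l2 := by
  intro l1
  induction l1 with
  | nil => intro l2 _ _; simp
  | cons i l1' ih =>
    intro l2 h1 h2
    cases l2 with
    | nil => simp
    | cons j l2' =>
      have hi : 0 ≤ i := h1 i (by simp)
      have hj : 0 ≤ j := h2 j (by simp)
      simp only [List.map_cons, List.zipWith_cons_cons]
      rw [ih l2' (fun k hk => h1 k (by simp [hk])) (fun k hk => h2 k (by simp [hk]))]
      congr 1
      rw [PySem.List.slice_toNat (ha := by omega) (hb := by omega),
          PySem.List.slice_toNat (ha := hi) (hb := hj)]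
      have h1' : (i + 1).toNat = i.toNat + 1 := by omega
      have h2' : (j + 1).toNat = j.toNat + 1 := by omega
      rw [h1', h2', List.drop_succ_cons]
      congr 1
      omega

lemma pvI_cons (t : Int) (a b : Int) (r : List Int) :
    pvI t (a :: b :: r) = (if ¬ |b - a| < t then [1] else []) ++ (pvI t (b :: r)).map (· + 1) := by
  unfold pvI
  have hlen : ((a :: b :: r).length : Int) = (r.length : Int) + 2 := by simp; omega
  have hlen' : (((b :: r).length : Int)) = (r.length : Int) + 1 := by simp
  rw [hlen, hlen']
  rw [PySem.List.pyRange_one_cons (by omega)]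
  have hshift : PySem.List.pyRange (1 + 1) ((r.length : Int) + 2) 1
      = (PySem.List.pyRange 1 ((r.length : Int) + 1) 1).map (· + 1) := by
    rw [PySem.List.pyRange_one, PySem.List.pyRange_one, List.map_map]
    have : ((r.length : Int) + 2 - (1 + 1)).toNat = ((r.length : Int) + 1 - 1).toNat := by omega
    rw [this]
    apply List.map_congr_left
    intro k _
    simp [Function.comp]
    omega
  rw [List.filter_cons, hshift, List.filter_map]
  have hhead : (decide (¬ (|PySem.List.pyGetD (a :: b :: r) 1 0
      - PySem.List.pyGetD (a :: b :: r) (1 - 1) 0| < t))) = decide (¬ |b - a| < t) := by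
    have h1 : PySem.List.pyGetD (a :: b :: r) 1 0 = b := by
      rw [PySem.List.pyGetD_eq_getElem _ _ (by omega) (by simp)]; simp
    have h0 : PySem.List.pyGetD (a :: b :: r) (1 - 1) 0 = a := by
      norm_num [PySem.List.pyGetD_zero_cons]
    rw [h1, h0]
  rw [hhead]
  have hbody : List.filter ((fun i => decide (¬ (|PySem.List.pyGetD (a :: b :: r) i 0
        - PySem.List.pyGetD (a :: b :: r) (i - 1) 0| < t))) ∘ (· + 1))
        (PySem.List.pyRange 1 ((r.length : Int) + 1) 1)
      = List.filter (fun i => decide (¬ (|PySem.List.pyGetD (b :: r) i 0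
        - PySem.List.pyGetD (b :: r) (i - 1) 0| < t)))
        (PySem.List.pyRange 1 ((r.length : Int) + 1) 1) := by
    apply List.filter_congr
    intro i hi
    have hb := (PySem.List.mem_pyRange_one).mp hi
    have e1 : PySem.List.pyGetD (a :: b :: r) (i + 1) 0 = PySem.List.pyGetD (b :: r) i 0 := by
      rw [PySem.List.pyGetD_eq_getElem _ _ (by omega) (by simp; omega),
          PySem.List.pyGetD_eq_getElem _ _ (by omega) (by simp; omega)]
      have h1 : (i + 1).toNat = i.toNat + 1 := by omega
      simp only [h1, List.getElem_cons_succ]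
    have e2 : PySem.List.pyGetD (a :: b :: r) (i + 1 - 1) 0 = PySem.List.pyGetD (b :: r) (i - 1) 0 := by
      have e : i + 1 - 1 = (i - 1) + 1 := by ring
      rw [e, PySem.List.pyGetD_eq_getElem _ _ (by omega) (by simp; omega),
          PySem.List.pyGetD_eq_getElem _ _ (by omega) (by simp; omega)]
      have h1 : (i - 1 + 1).toNat = (i - 1).toNat + 1 := by omega
      simp only [h1, List.getElem_cons_succ]
    simp only [Function.comp_apply, e1, e2]
  rw [hbody]
  by_cases h : |b - a| < t <;> simp [h]

lemma pv_slices (t : Int) : ∀ (rest : List Int) (x : Int),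
    List.zipWith (fun i j => PySem.List.slice (x :: rest) (some i) (some j))
        (0 :: (pvI t (x :: rest) ++ [((x :: rest).length : Int)]))
        (pvI t (x :: rest) ++ [((x :: rest).length : Int)])
      = pvRecB t (x :: rest) := by
  intro rest
  induction rest with
  | nil =>
    intro x
    have hI : pvI t [x] = [] := by
      unfold pvI
      rw [show (([x] : List Int).length : Int) = 1 by simp, PySem.List.pyRange_one]
      simp
    rw [hI]
    simp only [List.nil_append, List.zipWith_cons_cons, List.zipWith_nil_right, List.length_cons,
      List.length_nil, Nat.cast_one, Nat.zero_add]
    rw [PySem.List.slice_toNat _ (by omega) (by omega)]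
    simp [pvRecB]
  | cons b r ih =>
    intro x
    have ihb := ih b
    have hL : ∀ i ∈ pvI t (b :: r) ++ [(((b :: r).length : Nat) : Int)], 0 ≤ i := by
      intro i hi
      rcases List.mem_append.mp hi with h | h
      · exact pvI_nonneg t (b :: r) i h
      · simp at h; omega
    have hlen : (((x :: b :: r).length : Nat) : Int) = (((b :: r).length : Nat) : Int) + 1 := by
      simp
    rw [pvI_cons, hlen]
    by_cases h : |b - x| < t
    · -- no break: glue x onto the first group
      simp only [h, not_true_eq_false, if_false, List.nil_append]
      have hmap : (pvI t (b :: r)).map (· + 1) ++ [(((b :: r).length : Nat) : Int) + 1]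
          = ((pvI t (b :: r)) ++ [(((b :: r).length : Nat) : Int)]).map (· + 1) := by
        simp
      rw [hmap]
      cases hc : pvI t (b :: r) ++ [(((b :: r).length : Nat) : Int)] with
      | nil => simp at hc
      | cons c L2 =>
        have hc0 : 0 ≤ c := hL c (by rw [hc]; simp)
        rw [hc] at ihb
        simp only [List.map_cons, List.zipWith_cons_cons] at ihb ⊢
        rw [show ((c + 1) :: L2.map (· + 1)) = (c :: L2).map (· + 1) from by simp]
        rw [pv_zip_shift (b :: r) x (c :: L2) L2 (by intro i hi; exact hL i (by rw [hc]; exact hi))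
              (fun i hi => hL i (by rw [hc]; simp [hi]))]
        cases hg : pvRecB t (b :: r) with
        | nil => exact absurd hg (pvRecB_ne_nil t b r)
        | cons g gs =>
          rw [hg] at ihb
          obtain ⟨hg1, hg2⟩ := List.cons.inj ihb
          rw [hg2]
          simp only [pvRecB, hg, h, if_pos]
          congr 1
          rw [← hg1]
          rw [PySem.List.slice_toNat _ (by omega) (by omega),
              PySem.List.slice_toNat _ (by omega) (by omega)]
          have : (c + 1).toNat = c.toNat + 1 := by omega
          simp [this]
    · -- break after x: x forms its own group
      simp only [h, not_false_eq_true, if_true]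
      have hmap : (pvI t (b :: r)).map (· + 1) ++ [(((b :: r).length : Nat) : Int) + 1]
          = ((pvI t (b :: r)) ++ [(((b :: r).length : Nat) : Int)]).map (· + 1) := by
        simp
      have hcons : (1 : Int) :: ((pvI t (b :: r)) ++ [(((b :: r).length : Nat) : Int)]).map (· + 1)
          = ((0 : Int) :: (pvI t (b :: r) ++ [(((b :: r).length : Nat) : Int)])).map (· + 1) := by
        simp
      simp only [List.nil_append, List.cons_append]
      rw [hmap, List.zipWith_cons_cons, hcons,
          pv_zip_shift (b :: r) x _ _ (by
            intro i hi
            rcases List.mem_cons.mp hi with h' | h'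
            · omega
            · exact hL i h') hL, ihb]
      cases hg : pvRecB t (b :: r) with
      | nil => exact absurd hg (pvRecB_ne_nil t b r)
      | cons g gs =>
        simp only [pvRecB, hg, h, if_neg, not_false_iff]
        rw [PySem.List.slice_toNat _ (by omega) (by omega)]
        simp

-- ===== VERDICT (by name: the statement is the Claim_ definition above) =====
theorem group_close_values_spec : Claim_equal_group_close_values := by
  intro data threshold _ hpre
  unfold Spec_group_close_values group_close_values group_close_values_alt
  cases hd : PySem.List.sorted data (fun x => x) false with
  | nil => exact absurd ((PySem.List.sorted_eq_nil_iff data (fun x => x) false).mp hd) hpre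
  | cons x rest =>
    dsimp only
    -- A's side equals the reference grouping
    have hA := pv_loop threshold rest [] [] x
    simp only [List.nil_append] at hA
    rw [hA]
    -- B's side: the cuts fold is [0] ++ pvI, the comprehension is a zipWith of slices
    rw [if_neg (by simp)]
    rw [PySem.List.foldl_append_ite_eq_filter
      (fun i => ¬ (|PySem.List.pyGetD (x :: rest) i 0 - PySem.List.pyGetD (x :: rest) (i - 1) 0| < threshold))]
    simp only [List.singleton_append]
    rw [show List.filter
        (fun i => decide (¬ (|PySem.List.pyGetD (x :: rest) i 0 - PySem.List.pyGetD (x :: rest) (i - 1) 0| < threshold)))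
        (PySem.List.pyRange 1 ((x :: rest).length : Int) 1) = pvI threshold (x :: rest) from rfl]
    -- the comprehension over indices is the zipWith of slices over consecutive cut points
    set c : List Int := (0 :: pvI threshold (x :: rest)) ++ [((x :: rest).length : Int)] with hc
    have hc1 : 1 ≤ c.length := by simp [hc]
    have hlen1 : ((c.length : Int) - 1) = ((c.length - 1 : Nat) : Int) := by omega
    rw [hlen1, PySem.List.pyRange_zero_natCast, List.map_map]
    have hmapc : List.map ((fun j => PySem.List.slice (x :: rest)
          (some (PySem.List.pyGetD c j 0)) (some (PySem.List.pyGetD c (j + 1) 0))) ∘ (fun k : Nat => (k : Int)))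
        (List.range (c.length - 1))
        = List.map (fun k : Nat => (fun i j => PySem.List.slice (x :: rest) (some i) (some j))
            (c.getD k 0) (c.getD (k + 1) 0)) (List.range (c.length - 1)) := by
      apply List.map_congr_left
      intro k _
      simp only [Function.comp_apply, PySem.List.pyGetD_natCast]
      rw [show ((k : Int) + 1) = ((k + 1 : Nat) : Int) by push_cast; ring,
          PySem.List.pyGetD_natCast]
    rw [hmapc, pv_map_adjacent_nat (fun i j => PySem.List.slice (x :: rest) (some i) (some j)) c]
    have htail : c.tail = pvI threshold (x :: rest) ++ [((x :: rest).length : Int)] := by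
      simp [hc]
    have hhead : c = 0 :: (pvI threshold (x :: rest) ++ [((x :: rest).length : Int)]) := by
      simp [hc]
    rw [htail, hhead, pv_slices]
    cases hg : pvRecB threshold (x :: rest) with
    | nil => exact absurd hg (pvRecB_ne_nil threshold x rest)
    | cons g gs => simp
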